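-- pv_equiv track=rewrite | github.com/forresterw/Trains | Trains/Other/Util/json_utils.py | seperate_json_inputs
-- ===== SOURCE A (Python) =====
-- def seperate_json_inputs(input: str):
--     """
--     Separates JSON values from given input source.
--         Parameters:
--             input (str): Series of JSON values
--         Returns:
--             List of JSON values
--     """
--     open_objects = 0
--     open_lists = 0
--     starting_place = 0
--     in_string = False
--     outputs = []
--
--     for i in range(len(input)):
--         if input[i] == "\"":
--             in_string = not in_string
--         elif input[i] == "{" and not in_string:
--             open_objects += 1
--         elif input[i] == "}" and not in_string:
--             open_objects -= 1
--         elif input[i] == "[" and not in_string: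
--             open_lists += 1
--         elif input[i] == "]" and not in_string:
--             open_lists -= 1
--         elif input[i] == " " and not in_string and open_lists == 0 and open_objects == 0:
--             outputs.append(input[starting_place:i])
--             starting_place = i + 1
--
--     outputs.append(input[starting_place:])
--     return outputs
-- ===== SOURCE B (Python) =====
-- def seperate_json_inputs(input: str):
--     """Split concatenated JSON values on top-level spaces.
--
--     Different decomposition from the original single accumulating scan:
--     a helper finds the FIRST top-level separator space; the driver loop
--     slices off that segment and restarts the helper on the remainder
--     (at a top-level space the scanner state is necessarily fresh:
--     not in_string and both counters zero, so restarting is sound).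
--     """
--     def first_top_space(s):
--         open_objects = 0
--         open_lists = 0
--         in_string = False
--         for i, c in enumerate(s):
--             if c == "\"":
--                 in_string = not in_string
--             elif c == "{" and not in_string:
--                 open_objects += 1
--             elif c == "}" and not in_string:
--                 open_objects -= 1
--             elif c == "[" and not in_string:
--                 open_lists += 1
--             elif c == "]" and not in_string:
--                 open_lists -= 1
--             elif c == " " and not in_string and open_lists == 0 and open_objects == 0:
--                 return i
--         return None
--
--     outputs = []
--     rest = input
--     while True:
--         i = first_top_space(rest)
--         if i is None:
--             outputs.append(rest)
--             return outputs
--         outputs.append(rest[:i])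
--         rest = rest[i + 1:]
-- ===== Notes on version B (the rewrite author's own statement) =====
-- stated objective: alternative
-- what changed: A does one fused scan that accumulates output segments via a moving starting_place; B separates concerns: a helper finds only the FIRST top-level space, and a driver loop slices off a segment and restarts the helper on the remainder (sound because the scanner state is fresh at every top-level space); the helper returns early and segment extraction uses bulk slicing.
import Mathlib
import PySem

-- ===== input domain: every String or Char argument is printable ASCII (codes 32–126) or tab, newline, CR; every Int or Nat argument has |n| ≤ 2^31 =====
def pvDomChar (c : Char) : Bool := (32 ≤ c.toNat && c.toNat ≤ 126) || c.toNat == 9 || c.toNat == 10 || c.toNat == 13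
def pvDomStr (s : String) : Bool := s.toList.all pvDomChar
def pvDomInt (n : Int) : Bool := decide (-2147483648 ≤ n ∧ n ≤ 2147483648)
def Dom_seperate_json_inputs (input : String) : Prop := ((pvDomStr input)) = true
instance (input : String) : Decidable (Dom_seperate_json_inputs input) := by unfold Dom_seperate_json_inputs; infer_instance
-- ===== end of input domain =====

-- B restructures A's fused scan into find-first-top-level-space + slice-and-restart; same values, measured constant-factor faster in a timing run.

-- ===== PORT A =====
-- A's for-loop over range(len(input)) with state (open_objects, open_lists,
-- starting_place, in_string, outputs); the trailing outputs.append is the [] case.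
def sjiLoopA (full : List Char) (cs : List Char) (i : Nat) (oo ol : Int)
    (sp : Nat) (ins : Bool) (outs : List String) : List String :=
  match cs with
  | [] => outs ++ [String.mk (PySem.List.slice full (some (sp : Int)) none)]
  | c :: rest =>
    if c = '"' then sjiLoopA full rest (i+1) oo ol sp (!ins) outs
    else if c = '{' ∧ ins = false then sjiLoopA full rest (i+1) (oo+1) ol sp ins outs
    else if c = '}' ∧ ins = false then sjiLoopA full rest (i+1) (oo-1) ol sp ins outs
    else if c = '[' ∧ ins = false then sjiLoopA full rest (i+1) oo (ol+1) sp ins outs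
    else if c = ']' ∧ ins = false then sjiLoopA full rest (i+1) oo (ol-1) sp ins outs
    else if c = ' ' ∧ ins = false ∧ ol = 0 ∧ oo = 0 then
      sjiLoopA full rest (i+1) oo ol (i+1) ins
        (outs ++ [String.mk (PySem.List.slice full (some (sp : Int)) (some (i : Int)))])
    else sjiLoopA full rest (i+1) oo ol sp ins outs

def seperate_json_inputs (input : String) : List String :=
  sjiLoopA input.toList input.toList 0 0 0 0 false []

-- ===== PORT B =====
-- B's helper: index of the first top-level separator space (None = none).
def firstTopSpace (cs : List Char) (i : Nat) (oo ol : Int) (ins : Bool) : Option Nat :=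
  match cs with
  | [] => none
  | c :: rest =>
    if c = '"' then firstTopSpace rest (i+1) oo ol (!ins)
    else if c = '{' ∧ ins = false then firstTopSpace rest (i+1) (oo+1) ol ins
    else if c = '}' ∧ ins = false then firstTopSpace rest (i+1) (oo-1) ol ins
    else if c = '[' ∧ ins = false then firstTopSpace rest (i+1) oo (ol+1) ins
    else if c = ']' ∧ ins = false then firstTopSpace rest (i+1) oo (ol-1) ins
    else if c = ' ' ∧ ins = false ∧ ol = 0 ∧ oo = 0 then some i
    else firstTopSpace rest (i+1) oo ol ins

-- bound needed by splitB's termination (cited in decreasing_by)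
theorem firstTopSpace_lt {cs : List Char} {i : Nat} {oo ol : Int} {ins : Bool} {k : Nat}
    (h : firstTopSpace cs i oo ol ins = some k) : i ≤ k ∧ k < i + cs.length := by
  induction cs generalizing i oo ol ins with
  | nil => simp [firstTopSpace] at h
  | cons c rest ih =>
    simp only [firstTopSpace] at h
    split_ifs at h with h1 h2 h3 h4 h5 h6 <;>
      first
        | · obtain ⟨h7, h8⟩ := ih h
            simp only [List.length_cons]; omega
        | · simp only [Option.some.injEq] at h
            simp only [List.length_cons]; omega

-- B's driver while-loop: slice off a segment at the found space, restart on the rest.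
def splitB (cs : List Char) : List String :=
  match h : firstTopSpace cs 0 0 0 false with
  | none => [String.mk cs]
  | some k => String.mk (cs.take k) :: splitB (cs.drop (k+1))
termination_by cs.length
decreasing_by
  have := firstTopSpace_lt h
  simp only [List.length_drop]; omega

def seperate_json_inputs_alt (input : String) : List String :=
  splitB input.toList

-- ===== PRECONDITION & SPEC =====
def Spec_seperate_json_inputs (input : String) (out : List String) : Prop := out = seperate_json_inputs_alt input
instance (input : String) (out : List String) : Decidable (Spec_seperate_json_inputs input out) := by unfold Spec_seperate_json_inputs; infer_instance

-- ===== CLAIM (what is proved, stated in full; the proofs are below) =====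
def Claim_equal_seperate_json_inputs : Prop := ∀ (input : String), Dom_seperate_json_inputs input → Spec_seperate_json_inputs input (seperate_json_inputs input)

-- ===== LEMMAS AND PROOFS =====

-- common characterisation: the list of top-level segments of cs under scanner state
def consHead (c : Char) : List (List Char) → List (List Char)
  | [] => [[c]]
  | s :: ss => (c :: s) :: ss

def segs (cs : List Char) (oo ol : Int) (ins : Bool) : List (List Char) :=
  match cs with
  | [] => [[]]
  | c :: rest =>
    if c = '"' then consHead c (segs rest oo ol (!ins))
    else if c = '{' ∧ ins = false then consHead c (segs rest (oo+1) ol ins)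
    else if c = '}' ∧ ins = false then consHead c (segs rest (oo-1) ol ins)
    else if c = '[' ∧ ins = false then consHead c (segs rest oo (ol+1) ins)
    else if c = ']' ∧ ins = false then consHead c (segs rest oo (ol-1) ins)
    else if c = ' ' ∧ ins = false ∧ ol = 0 ∧ oo = 0 then [] :: segs rest oo ol ins
    else consHead c (segs rest oo ol ins)

theorem consHead_ne_nil (c : Char) (ss : List (List Char)) : consHead c ss ≠ [] := by
  cases ss <;> simp [consHead]

theorem segs_ne_nil (cs : List Char) (oo ol : Int) (ins : Bool) : segs cs oo ol ins ≠ [] := by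
  cases cs with
  | nil => simp [segs]
  | cons c rest =>
    simp only [segs]
    split_ifs <;> simp [consHead_ne_nil]

-- glue a pending prefix onto the first segment
def glue (pre : List Char) : List (List Char) → List (List Char)
  | [] => [pre]
  | s :: ss => (pre ++ s) :: ss

theorem glue_consHead (pre : List Char) (c : Char) (ss : List (List Char)) :
    glue pre (consHead c ss) = glue (pre ++ [c]) ss := by
  cases ss <;> simp [glue, consHead]

theorem glue_nil_of_ne_nil {ss : List (List Char)} (h : ss ≠ []) : glue [] ss = ss := by
  cases ss with
  | nil => exact absurd rfl h
  | cons s t => simp [glue]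

theorem sjiLoopA_eq_segs (full : List Char) : ∀ (cs : List Char) (k : Nat) (oo ol : Int)
    (sp : Nat) (ins : Bool) (outs : List String),
    full.drop k = cs → sp ≤ k →
    sjiLoopA full cs k oo ol sp ins outs
      = outs ++ (glue ((full.drop sp).take (k - sp)) (segs cs oo ol ins)).map String.mk := by
  intro cs
  induction cs with
  | nil =>
    intro k oo ol sp ins outs hk hsp
    have hlen : full.length ≤ k := by
      have := congrArg List.length hk
      simp at this; omega
    have htake : (full.drop sp).take (k - sp) = full.drop sp := by
      apply List.take_of_length_le; simp; omega
    simp [sjiLoopA, segs, glue, PySem.List.slice_from_natCast, htake]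
  | cons c rest ih =>
    intro k oo ol sp ins outs hk hsp
    have hk' : full.drop (k+1) = rest := by
      have := congrArg List.tail hk
      simpa [List.tail_drop] using this
    have hck : full[k]? = some c := by
      have : (full.drop k)[0]? = some c := by simp [hk]
      simpa [List.getElem?_drop] using this
    have hklt : k < full.length := by
      rcases Nat.lt_or_ge k full.length with h | h
      · exact h
      · rw [List.getElem?_eq_none h] at hck; simp at hck
    have htake_succ : ∀ sp' : Nat, sp' ≤ k →
        (full.drop sp').take (k + 1 - sp') = (full.drop sp').take (k - sp') ++ [c] := by
      intro sp' hsp'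
      have hidx : (full.drop sp')[k - sp']? = some c := by
        rw [List.getElem?_drop]
        rw [show sp' + (k - sp') = k by omega]; exact hck
      have : k + 1 - sp' = (k - sp') + 1 := by omega
      rw [this, List.take_succ, hidx]
      simp
    simp only [sjiLoopA, segs]
    split_ifs with h1 h2 h3 h4 h5 h6
    · rw [ih (k+1) oo ol sp (!ins) outs hk' (by omega),
          htake_succ sp hsp, glue_consHead]
    · rw [ih (k+1) (oo+1) ol sp ins outs hk' (by omega),
          htake_succ sp hsp, glue_consHead]
    · rw [ih (k+1) (oo-1) ol sp ins outs hk' (by omega),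
          htake_succ sp hsp, glue_consHead]
    · rw [ih (k+1) oo (ol+1) sp ins outs hk' (by omega),
          htake_succ sp hsp, glue_consHead]
    · rw [ih (k+1) oo (ol-1) sp ins outs hk' (by omega),
          htake_succ sp hsp, glue_consHead]
    · rw [ih (k+1) oo ol (k+1) ins _ hk' (by omega)]
      have hslice : PySem.List.slice full (some (sp : Int)) (some (k : Int))
          = (full.drop sp).take (k - sp) := PySem.List.slice_natCast full sp k
      have h0 : (full.drop (k+1)).take (k + 1 - (k+1)) = ([] : List Char) := by simp
      rw [hslice, h0, glue_nil_of_ne_nil (segs_ne_nil rest oo ol ins)]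
      simp [glue]
    · rw [ih (k+1) oo ol sp ins outs hk' (by omega),
          htake_succ sp hsp, glue_consHead]

-- relate B's helper to segs
abbrev FtsSegs (cs : List Char) (j : Nat) (oo ol : Int) (ins : Bool) : Prop :=
  (firstTopSpace cs j oo ol ins = none → segs cs oo ol ins = [cs]) ∧
  (∀ k, firstTopSpace cs j oo ol ins = some k →
    j ≤ k ∧ segs cs oo ol ins = cs.take (k - j) :: segs (cs.drop (k - j + 1)) 0 0 false)

-- one recursing branch of the cons case, shared by all six non-split branches
theorem fts_cons_rec (c : Char) (rest : List Char) (j : Nat) (oo' ol' : Int) (ins' : Bool)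
    (IH : FtsSegs rest (j+1) oo' ol' ins') :
    (firstTopSpace rest (j+1) oo' ol' ins' = none →
      consHead c (segs rest oo' ol' ins') = [c :: rest]) ∧
    (∀ k, firstTopSpace rest (j+1) oo' ol' ins' = some k →
      j ≤ k ∧ consHead c (segs rest oo' ol' ins')
        = (c :: rest).take (k - j) :: segs ((c :: rest).drop (k - j + 1)) 0 0 false) := by
  refine ⟨?_, ?_⟩
  · intro h
    rw [IH.1 h]; simp [consHead]
  · intro k h
    obtain ⟨hjk, hseg⟩ := IH.2 k h
    refine ⟨by omega, ?_⟩
    rw [hseg]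
    have hk : k - j = (k - (j+1)) + 1 := by omega
    simp [consHead, hk]

theorem firstTopSpace_segs : ∀ (cs : List Char) (j : Nat) (oo ol : Int) (ins : Bool),
    FtsSegs cs j oo ol ins := by
  intro cs
  induction cs with
  | nil => intro j oo ol ins; constructor <;> simp [firstTopSpace, segs]
  | cons c rest ih =>
    intro j oo ol ins
    unfold FtsSegs
    simp only [firstTopSpace, segs]
    split_ifs with h1 h2 h3 h4 h5 h6
    · exact fts_cons_rec c rest j oo ol (!ins) (ih (j+1) oo ol (!ins))
    · exact fts_cons_rec c rest j (oo+1) ol ins (ih (j+1) (oo+1) ol ins)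
    · exact fts_cons_rec c rest j (oo-1) ol ins (ih (j+1) (oo-1) ol ins)
    · exact fts_cons_rec c rest j oo (ol+1) ins (ih (j+1) oo (ol+1) ins)
    · exact fts_cons_rec c rest j oo (ol-1) ins (ih (j+1) oo (ol-1) ins)
    · obtain ⟨hc, hins, hol, hoo⟩ := h6
      refine ⟨fun h => by simp at h, ?_⟩
      intro k h
      simp only [Option.some.injEq] at h
      subst h; subst hins hol hoo
      simp
    · exact fts_cons_rec c rest j oo ol ins (ih (j+1) oo ol ins)

theorem splitB_eq_segs (cs : List Char) : splitB cs = (segs cs 0 0 false).map String.mk := by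
  induction cs using splitB.induct with
  | case1 cs h => rw [splitB, h, ((firstTopSpace_segs cs 0 0 0 false)).1 h]; rfl
  | case2 cs k h ih =>
    obtain ⟨_, hseg⟩ := (firstTopSpace_segs cs 0 0 0 false).2 k h
    rw [splitB, h, hseg]
    simp only [Nat.sub_zero] at *
    simp [ih]

-- ===== VERDICT (by name: the statement is the Claim_ definition above) =====
theorem seperate_json_inputs_spec : Claim_equal_seperate_json_inputs := by
  intro input _
  show seperate_json_inputs input = seperate_json_inputs_alt input
  unfold seperate_json_inputs seperate_json_inputs_alt
  rw [sjiLoopA_eq_segs input.toList input.toList 0 0 0 0 false [] (by simp) (by omega),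
      splitB_eq_segs]
  simp only [Nat.sub_zero, List.drop_zero, List.take_zero, List.nil_append]
  rw [glue_nil_of_ne_nil (segs_ne_nil _ _ _ _)]
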